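-- pv_equiv track=rewrite | github.com/HEMANTVG01/Python | PYTHON-BASIC/practice/1_python_part_1/task4.py | power_diff
-- ===== SOURCE A (Python) =====
-- def power_diff(arr):
--     n = len(arr)
--     r = []
--     for i in range(n):
--         if i == 0:
--             r.append(arr[i]**2)
--         else:
--             power = arr[i] ** 2
--             prev = arr[i-1] ** 2
--             diff = power - (prev - arr[i-1])
--             r.append(diff)
--     return r
-- ===== SOURCE B (Python) =====
-- def power_diff(arr):
--     # Telescoping reformulation: with s_k = arr[k]**2 + (arr[0]+...+arr[k-1])
--     # the k-th output equals s_k - s_{k-1} (taking s_{-1} = 0), so a single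
--     # branch-free loop over running accumulators needs no indexing and no
--     # i == 0 special case.
--     res = []
--     prefix = 0
--     prev = 0
--     for x in arr:
--         s = x * x + prefix
--         res.append(s - prev)
--         prefix += x
--         prev = s
--     return res
-- ===== Notes on version B (the rewrite author's own statement) =====
-- stated objective: alternative
-- what changed: Replaces A's indexed loop with an i==0 branch and recomputation of arr[i-1]**2 by a branch-free telescoping scan: it maintains a running prefix sum and the previous value of s_k = arr[k]**2 + prefix, emitting s_k - s_{k-1}, with no list indexing and no special case.
import Mathlib
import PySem

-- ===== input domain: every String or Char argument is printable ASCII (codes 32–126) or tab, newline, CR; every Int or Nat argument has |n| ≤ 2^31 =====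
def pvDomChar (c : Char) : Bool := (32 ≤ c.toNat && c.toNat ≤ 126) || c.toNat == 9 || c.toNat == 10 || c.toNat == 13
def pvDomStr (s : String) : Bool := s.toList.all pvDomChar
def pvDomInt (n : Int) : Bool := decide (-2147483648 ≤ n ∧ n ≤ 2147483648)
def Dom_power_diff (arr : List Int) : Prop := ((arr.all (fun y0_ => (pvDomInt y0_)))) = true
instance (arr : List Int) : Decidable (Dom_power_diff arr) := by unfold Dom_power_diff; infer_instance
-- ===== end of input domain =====

-- B replaces A's indexed loop (with its i==0 branch and inline arr[i-1]**2) by a branch-free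
-- telescoping scan over running accumulators; objective: alternative, return value only.

-- ===== PORT A =====
def power_diff (arr : List Int) : List Int :=
  let n : Int := PySem.List.len arr
  (PySem.List.pyRange 0 n 1).foldl (fun r i =>
    if i = 0 then
      r ++ [(PySem.List.pyGetD arr i 0) ^ 2]
    else
      let power := (PySem.List.pyGetD arr i 0) ^ 2
      let prev := (PySem.List.pyGetD arr (i - 1) 0) ^ 2
      let diff := power - (prev - PySem.List.pyGetD arr (i - 1) 0)
      r ++ [diff]) []

-- ===== PORT B =====
def power_diff_alt (arr : List Int) : List Int :=
  (arr.foldl (fun (st : List Int × Int × Int) x =>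
    let s := x * x + st.2.1
    (st.1 ++ [s - st.2.2], st.2.1 + x, s)) ([], 0, 0)).1

-- ===== PRECONDITION & SPEC =====
def Spec_power_diff (arr : List Int) (out : List Int) : Prop := out = power_diff_alt arr
instance (arr : List Int) (out : List Int) : Decidable (Spec_power_diff arr out) := by unfold Spec_power_diff; infer_instance

-- ===== CLAIM (what is proved, stated in full; the proofs are below) =====
def Claim_equal_power_diff : Prop := ∀ (arr : List Int), Dom_power_diff arr → Spec_power_diff arr (power_diff arr)

-- ===== LEMMAS AND PROOFS =====

-- the per-index value A's loop appends
def pvF (arr : List Int) (i : Int) : Int :=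
  if i = 0 then (PySem.List.pyGetD arr i 0) ^ 2
  else (PySem.List.pyGetD arr i 0) ^ 2 -
    ((PySem.List.pyGetD arr (i - 1) 0) ^ 2 - PySem.List.pyGetD arr (i - 1) 0)

-- the common head-plus-adjacent-pairs description both ports are reduced to
def pvSpecList (arr : List Int) : List Int :=
  match arr with
  | [] => []
  | a :: _ => a * a :: (arr.zip arr.tail).map (fun p => p.2 * p.2 - p.1 * p.1 + p.1)

theorem power_diff_eq_map (arr : List Int) :
    power_diff arr = (List.range arr.length).map (fun (k : Nat) => pvF arr (k : Int)) := by
  unfold power_diff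
  have hfun : (fun (r : List Int) (i : Int) =>
      if i = 0 then r ++ [(PySem.List.pyGetD arr i 0) ^ 2]
      else
        let power := (PySem.List.pyGetD arr i 0) ^ 2
        let prev := (PySem.List.pyGetD arr (i - 1) 0) ^ 2
        let diff := power - (prev - PySem.List.pyGetD arr (i - 1) 0)
        r ++ [diff]) = fun r i => r ++ [pvF arr i] := by
    funext r i
    by_cases h : i = 0 <;> simp [pvF, h]
  rw [hfun, PySem.List.foldl_append_singleton_eq_map, PySem.List.len_eq,
    PySem.List.pyRange_one, List.map_map]
  simp only [Function.comp_def, zero_add, sub_zero, Int.toNat_natCast, List.nil_append]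

theorem power_diff_eq_spec (arr : List Int) :
    power_diff arr = pvSpecList arr := by
  rw [power_diff_eq_map]
  match arr with
  | [] => simp [pvSpecList]
  | a :: t =>
    apply List.ext_getElem
    · simp [pvSpecList]
    · intro j hj hj'
      simp only [List.length_map, List.length_range] at hj
      rcases j with _ | k
      · simp [pvF, pvSpecList, pysem]
        ring
      · have hk : k < t.length := by simpa using hj
        simp only [List.getElem_map, List.getElem_range, pvSpecList,
          List.getElem_cons_succ]
        rw [List.getElem_zip]
        have h1 : ((k + 1 : Nat) : Int) ≠ 0 := by positivity
        have h2 : ((k + 1 : Nat) : Int) - 1 = ((k : Nat) : Int) := by push_cast; ring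
        simp only [pvF]
        rw [if_neg h1, h2, PySem.List.pyGetD_natCast, PySem.List.pyGetD_natCast,
          List.getD_eq_getElem _ _ (by simp [List.length_cons]; omega),
          List.getD_eq_getElem _ _ (by simp [List.length_cons]; omega)]
        simp only [List.getElem_cons_succ, List.tail_cons]
        ring

-- recursive description of B's loop body
def pvSeg : List Int → Int → Int → List Int
  | [], _, _ => []
  | x :: t, P, s => (x * x + P - s) :: pvSeg t (P + x) (x * x + P)

theorem foldl_eq_pvSeg (l : List Int) (acc : List Int) (P s : Int) :
    (l.foldl (fun (st : List Int × Int × Int) x =>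
      let s := x * x + st.2.1
      (st.1 ++ [s - st.2.2], st.2.1 + x, s)) (acc, P, s)).1 = acc ++ pvSeg l P s := by
  induction l generalizing acc P s with
  | nil => simp [pvSeg]
  | cons x t ih => simp [pvSeg, List.foldl_cons, ih]

theorem pvSeg_zip (t : List Int) (a P : Int) :
    pvSeg t (P + a) (a * a + P) =
      ((a :: t).zip t).map (fun p => p.2 * p.2 - p.1 * p.1 + p.1) := by
  induction t generalizing a P with
  | nil => simp [pvSeg]
  | cons x t' ih =>
    simp only [pvSeg, List.zip_cons_cons, List.map_cons]
    have hh : x * x + (P + a) - (a * a + P) = x * x - a * a + a := by ring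
    rw [hh, ih x (P + a)]

theorem power_diff_alt_eq_spec (arr : List Int) :
    power_diff_alt arr = pvSpecList arr := by
  unfold power_diff_alt
  match arr with
  | [] => simp [pvSpecList]
  | a :: t =>
    rw [List.foldl_cons]
    simp only
    rw [foldl_eq_pvSeg]
    have h0 : a * a + 0 - 0 = a * a := by ring
    simp only [pvSpecList, List.tail_cons, h0, List.nil_append]
    simpa using pvSeg_zip t a 0

-- ===== VERDICT (by name: the statement is the Claim_ definition above) =====
theorem power_diff_spec : Claim_equal_power_diff := by
  intro arr _
  unfold Spec_power_diff
  rw [power_diff_eq_spec, power_diff_alt_eq_spec]
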